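-- pv_equiv track=rewrite | github.com/dongphuonghong/labPython | lab4/bt49.py | tinh_tien_thue_may
-- ===== SOURCE A (Python) =====
-- def tinh_tien_thue_may(GBD, GKT, SoMay):
--     if not (6 <= GBD < GKT <= 21):
--         return "Dữ liệu nhập vào không hợp lệ."
--     tien_thue = 0
--     for gio in range(GBD, GKT):
--         if gio < 17:
--                     tien_thue += 2500 * SoMay
--         else:
--                 tien_thue += 3000 * SoMay
--     return f"Tổng tiền thuê máy: {tien_thue} đồng"
-- ===== SOURCE B (Python) =====
-- def tinh_tien_thue_may(GBD, GKT, SoMay):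
--     if not (6 <= GBD < GKT <= 21):
--         return "Dữ liệu nhập vào không hợp lệ."
--     before = max(0, min(GKT, 17) - GBD)
--     after = max(0, GKT - max(GBD, 17))
--     tien_thue = (before * 2500 + after * 3000) * SoMay
--     return f"Tổng tiền thuê máy: {tien_thue} đồng"
-- ===== Notes on version B (the rewrite author's own statement) =====
-- stated objective: simpler
-- what changed: The per-hour accumulation loop is replaced by a closed-form split of the rental interval at 17h: before = max(0, min(GKT,17)-GBD) hours at 2500 and after = max(0, GKT-max(GBD,17)) hours at 3000, multiplied by SoMay.
import Mathlib
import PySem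

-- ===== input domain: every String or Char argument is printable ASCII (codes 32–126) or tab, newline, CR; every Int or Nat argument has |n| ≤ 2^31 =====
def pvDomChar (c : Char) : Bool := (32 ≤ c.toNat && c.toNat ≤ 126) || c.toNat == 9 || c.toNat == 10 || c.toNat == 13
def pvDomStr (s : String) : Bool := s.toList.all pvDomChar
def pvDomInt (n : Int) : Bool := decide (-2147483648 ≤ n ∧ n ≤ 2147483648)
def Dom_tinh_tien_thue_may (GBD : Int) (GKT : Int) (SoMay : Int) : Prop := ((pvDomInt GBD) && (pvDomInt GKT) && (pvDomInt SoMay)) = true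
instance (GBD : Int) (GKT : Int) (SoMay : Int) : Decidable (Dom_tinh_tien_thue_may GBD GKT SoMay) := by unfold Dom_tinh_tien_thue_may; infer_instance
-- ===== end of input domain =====

-- B replaces A's per-hour accumulation loop with a closed-form split of the interval at 17h (simpler).

-- ===== PORT A =====
def tinh_tien_thue_may (GBD : Int) (GKT : Int) (SoMay : Int) : String :=
  if ¬(6 ≤ GBD ∧ GBD < GKT ∧ GKT ≤ 21) then "Dữ liệu nhập vào không hợp lệ."
  else
    let tien_thue : Int :=
      (PySem.List.pyRange GBD GKT 1).foldl
        (fun tien_thue gio =>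
          if gio < 17 then tien_thue + 2500 * SoMay else tien_thue + 3000 * SoMay) 0
    "Tổng tiền thuê máy: " ++ PySem.Int.toStr tien_thue ++ " đồng"

-- ===== PORT B =====
def tinh_tien_thue_may_alt (GBD : Int) (GKT : Int) (SoMay : Int) : String :=
  if ¬(6 ≤ GBD ∧ GBD < GKT ∧ GKT ≤ 21) then "Dữ liệu nhập vào không hợp lệ."
  else
    let before : Int := max 0 (min GKT 17 - GBD)
    let after : Int := max 0 (GKT - max GBD 17)
    let tien_thue : Int := (before * 2500 + after * 3000) * SoMay
    "Tổng tiền thuê máy: " ++ PySem.Int.toStr tien_thue ++ " đồng"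

-- ===== PRECONDITION & SPEC =====
def Spec_tinh_tien_thue_may (GBD : Int) (GKT : Int) (SoMay : Int) (out : String) : Prop := out = tinh_tien_thue_may_alt GBD GKT SoMay
instance (GBD : Int) (GKT : Int) (SoMay : Int) (out : String) : Decidable (Spec_tinh_tien_thue_may GBD GKT SoMay out) := by unfold Spec_tinh_tien_thue_may; infer_instance

-- ===== CLAIM (what is proved, stated in full; the proofs are below) =====
def Claim_equal_tinh_tien_thue_may : Prop := ∀ (GBD : Int) (GKT : Int) (SoMay : Int), Dom_tinh_tien_thue_may GBD GKT SoMay → Spec_tinh_tien_thue_may GBD GKT SoMay (tinh_tien_thue_may GBD GKT SoMay)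

-- ===== LEMMAS AND PROOFS =====

-- A's fold over range(a, b) equals B's closed form, for any start value.
lemma fold_fee (SoMay : Int) : ∀ (n : Nat) (a b init : Int), (b - a).toNat = n →
    (PySem.List.pyRange a b 1).foldl
      (fun t gio => if gio < 17 then t + 2500 * SoMay else t + 3000 * SoMay) init
      = init + (max 0 (min b 17 - a) * 2500 + max 0 (b - max a 17) * 3000) * SoMay := by
  intro n
  induction n with
  | zero =>
    intro a b init h
    rw [PySem.List.pyRange_one_eq_nil (by omega)]
    have h1 : max 0 (min b 17 - a) = 0 := by omega
    have h2 : max 0 (b - max a 17) = 0 := by omega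
    simp [h1, h2]
  | succ n ih =>
    intro a b init h
    have hab : a < b := by omega
    rw [PySem.List.pyRange_one_cons hab]
    simp only [List.foldl_cons]
    rw [ih (a + 1) b _ (by omega)]
    by_cases hc : a < 17
    · have h1 : max 0 (min b 17 - a) = max 0 (min b 17 - (a + 1)) + 1 := by omega
      have h2 : max a 17 = max (a + 1) 17 := by omega
      simp only [if_pos hc, h1, h2]
      ring
    · have h1 : max 0 (min b 17 - a) = 0 := by omega
      have h1' : max 0 (min b 17 - (a + 1)) = 0 := by omega
      have h2 : max 0 (b - max a 17) = max 0 (b - max (a + 1) 17) + 1 := by omega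
      simp only [if_neg hc, h1, h1', h2]
      ring

-- ===== VERDICT (by name: the statement is the Claim_ definition above) =====
theorem tinh_tien_thue_may_spec : Claim_equal_tinh_tien_thue_may := by
  intro GBD GKT SoMay _
  unfold Spec_tinh_tien_thue_may tinh_tien_thue_may tinh_tien_thue_may_alt
  by_cases hv : 6 ≤ GBD ∧ GBD < GKT ∧ GKT ≤ 21
  · simp only [hv]
    rw [fold_fee SoMay (GKT - GBD).toNat GBD GKT 0 rfl]
    ring_nf
  · simp [hv]
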